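-- pv_equiv track=rewrite | github.com/januszmk/Qnapi | aeidon/agents/open.py | _sort_subtitles
-- ===== SOURCE A (Python) =====
-- import bisect
--
-- def _sort_subtitles(subtitles):
--     """
--     Sort and return `subtitles` and sort count.
--
--     `subtitles` are sorted according to their start positions. Sort count
--     is the amount of subtitles that needed to be moved in order to arrange
--     them in ascending chronological order.
--     """
--     sort_count = 0
--     sorted_subtitles = []
--     while subtitles:
--         subtitle = subtitles.pop(0)
--         index = bisect.bisect(sorted_subtitles, subtitle)
--         if index < len(sorted_subtitles):
--             sort_count += 1
--         sorted_subtitles.insert(index, subtitle)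
--     return sorted_subtitles, sort_count
-- ===== SOURCE B (Python) =====
-- def _sort_subtitles(subtitles):
--     """
--     Sort and return `subtitles` and sort count.
--
--     Single pass with a running maximum counts the subtitles that have some
--     strictly greater subtitle before them (exactly those A's bisect loop
--     counts), and the ordered list comes from one stable sorted() call.
--     Like A, this consumes the input list (it is left empty).
--     """
--     sort_count = 0
--     running_max = None
--     for s in subtitles:
--         if running_max is not None and s < running_max:
--             sort_count += 1
--         if running_max is None or s > running_max:
--             running_max = s
--     result = sorted(subtitles)
--     subtitles.clear()  # A pops every element; match that side effect
--     return result, sort_count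
-- ===== Notes on version B (the rewrite author's own statement) =====
-- stated objective: faster
-- what changed: replaces the quadratic pop(0)/bisect/insert loop by one running-max pass for the count plus a single O(n log n) sorted() call for the order
import Mathlib
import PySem

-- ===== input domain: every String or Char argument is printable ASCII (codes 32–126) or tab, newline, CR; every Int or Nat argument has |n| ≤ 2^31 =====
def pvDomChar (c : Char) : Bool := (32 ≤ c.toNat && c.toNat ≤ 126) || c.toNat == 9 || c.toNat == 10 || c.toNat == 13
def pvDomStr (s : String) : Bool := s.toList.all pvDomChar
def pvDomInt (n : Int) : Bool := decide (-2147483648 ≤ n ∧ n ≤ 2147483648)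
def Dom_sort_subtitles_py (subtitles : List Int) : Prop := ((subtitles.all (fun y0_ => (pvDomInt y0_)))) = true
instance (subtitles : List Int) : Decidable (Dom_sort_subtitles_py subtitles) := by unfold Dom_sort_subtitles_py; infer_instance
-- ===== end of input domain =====

-- B replaces A's quadratic pop(0)/bisect/insert loop by one running-max pass for the
-- count plus a single stable sort for the order (both programs also empty the Python
-- argument list in place; the equivalence proved here is about the return value).

-- ===== PORT A =====
-- the 'while subtitles: subtitle = subtitles.pop(0); …' loop, state = (sorted_subtitles, sort_count)
def pvALoop : List Int → List Int → Int → List Int × Int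
  | [], sorted_subtitles, sort_count => (sorted_subtitles, sort_count)
  | subtitle :: rest, sorted_subtitles, sort_count =>
      let index := PySem.List.bisectRight sorted_subtitles subtitle
      pvALoop rest (PySem.List.insert sorted_subtitles (index : Int) subtitle)
        (if index < sorted_subtitles.length then sort_count + 1 else sort_count)

def sort_subtitles_py (subtitles : List Int) : List Int × Int :=
  pvALoop subtitles [] 0

-- ===== PORT B =====
-- one iteration of B's for-loop: state = (running_max, sort_count)
def pvBStep (st : Option Int × Int) (s : Int) : Option Int × Int :=
  match st with
  | (none, sort_count) => (some s, sort_count)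
  | (some m, sort_count) =>
      (if s > m then some s else some m, if s < m then sort_count + 1 else sort_count)

def sort_subtitles_py_alt (subtitles : List Int) : List Int × Int :=
  let st := subtitles.foldl pvBStep (none, 0)
  (PySem.List.sorted subtitles (fun x => x), st.2)

-- ===== PRECONDITION & SPEC =====
def Spec_sort_subtitles_py (subtitles : List Int) (out : List Int × Int) : Prop := out = sort_subtitles_py_alt subtitles
instance (subtitles : List Int) (out : List Int × Int) : Decidable (Spec_sort_subtitles_py subtitles out) := by unfold Spec_sort_subtitles_py; infer_instance

-- ===== CLAIM (what is proved, stated in full; the proofs are below) =====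
def Claim_equal_sort_subtitles_py : Prop := ∀ (subtitles : List Int), Dom_sort_subtitles_py subtitles → Spec_sort_subtitles_py subtitles (sort_subtitles_py subtitles)

-- ===== LEMMAS AND PROOFS =====

-- the invariant tying B's running max to A's accumulated list
def pvInv (m : Option Int) (acc : List Int) : Prop :=
  (m = none ∧ acc = []) ∨ ∃ mx, m = some mx ∧ mx ∈ acc ∧ ∀ y ∈ acc, y ≤ mx

-- A's count condition at one step, characterised on a sorted accumulator
lemma pv_bisect_lt_iff (acc : List Int) (s : Int) (h : acc.Pairwise (· ≤ ·)) :
    PySem.List.bisectRight acc s < acc.length ↔ ∃ y ∈ acc, s < y := by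
  obtain ⟨hle, hlo, hhi⟩ := PySem.List.bisectRight_spec acc s h
  constructor
  · intro hlt
    exact ⟨acc[PySem.List.bisectRight acc s], List.getElem_mem hlt, hhi _ hlt le_rfl⟩
  · rintro ⟨y, hy, hsy⟩
    obtain ⟨j, hj, rfl⟩ := List.mem_iff_getElem.mp hy
    by_contra hnot
    rcases Nat.lt_or_ge j (PySem.List.bisectRight acc s) with hj' | hj'
    · exact absurd (hlo j hj hj') (not_le.mpr hsy)
    · omega

-- inserting at bisectRight keeps the accumulator sorted and is a permutation of cons
lemma pv_insert_sorted_perm (acc : List Int) (s : Int) (h : acc.Pairwise (· ≤ ·)) :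
    (PySem.List.insert acc (PySem.List.bisectRight acc s : Int) s).Pairwise (· ≤ ·) ∧
    (PySem.List.insert acc (PySem.List.bisectRight acc s : Int) s).Perm (s :: acc) := by
  obtain ⟨hle, hlo, hhi⟩ := PySem.List.bisectRight_spec acc s h
  rw [PySem.List.insert_natCast acc _ s hle]
  set i := PySem.List.bisectRight acc s with hi
  refine ⟨?_, ?_⟩
  · have htake : ∀ a ∈ acc.take i, a ≤ s := by
      intro a ha
      obtain ⟨j, hj, rfl⟩ := List.mem_iff_getElem.mp ha
      rw [List.getElem_take]
      exact hlo j (by simp at hj; omega) (by simp at hj; omega)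
    have hdrop : ∀ b ∈ acc.drop i, s ≤ b := by
      intro b hb
      obtain ⟨k, hk, rfl⟩ := List.mem_iff_getElem.mp hb
      rw [List.getElem_drop]
      exact le_of_lt (hhi (i + k) (by simp at hk; omega) (by omega))
    rw [List.pairwise_append]
    refine ⟨h.sublist (List.take_sublist i acc), ?_, ?_⟩
    · rw [List.pairwise_cons]
      exact ⟨hdrop, h.sublist (List.drop_sublist i acc)⟩
    · intro a ha b hb
      rcases List.mem_cons.mp hb with rfl | hb'
      · exact htake a ha
      · exact le_trans (htake a ha) (hdrop b hb')
  · have hp := @List.perm_middle _ s (acc.take i) (acc.drop i)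
    rwa [List.take_append_drop] at hp

-- the main loop invariant: A's loop = (stable sort of everything, B's fold count)
lemma pv_loop_eq : ∀ (subs acc : List Int) (c : Int) (m : Option Int),
    acc.Pairwise (· ≤ ·) → pvInv m acc →
    pvALoop subs acc c =
      (PySem.List.sorted (acc ++ subs) (fun x => x), (subs.foldl pvBStep (m, c)).2) := by
  intro subs
  induction subs with
  | nil =>
      intro acc c m hs _
      simp only [pvALoop, List.append_nil, List.foldl_nil]
      rw [PySem.List.sorted_eq_self_of_pairwise _ _ hs]
  | cons s rest ih =>
      intro acc c m hs hinv
      obtain ⟨hs', hperm⟩ := pv_insert_sorted_perm acc s hs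
      have hcond : (PySem.List.bisectRight acc s < acc.length) ↔
          ∃ y ∈ acc, s < y := pv_bisect_lt_iff acc s hs
      -- B's one step equals A's one step on count, and the new max respects the invariant
      have hstep : pvBStep (m, c) s =
          ((pvBStep (m, c) s).1,
           if PySem.List.bisectRight acc s < acc.length then c + 1 else c) := by
        rcases hinv with ⟨rfl, rfl⟩ | ⟨mx, rfl, hmem, hub⟩
        · simp [pvBStep]
        · simp only [pvBStep]
          have : (PySem.List.bisectRight acc s < acc.length) ↔ s < mx := by
            rw [hcond]
            exact ⟨fun ⟨y, hy, hsy⟩ => lt_of_lt_of_le hsy (hub y hy),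
                   fun h => ⟨mx, hmem, h⟩⟩
          rcases lt_or_ge s mx with h' | h' <;> simp [this, h', not_lt_of_ge]
      have hinv' : pvInv (pvBStep (m, c) s).1
          (PySem.List.insert acc (PySem.List.bisectRight acc s : Int) s) := by
        have hmem' : ∀ z, z ∈ PySem.List.insert acc (PySem.List.bisectRight acc s : Int) s
            ↔ z = s ∨ z ∈ acc := by
          intro z; rw [hperm.mem_iff, List.mem_cons]
        rcases hinv with ⟨rfl, rfl⟩ | ⟨mx, rfl, hmem, hub⟩
        · refine Or.inr ⟨s, rfl, ?_, ?_⟩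
          · rw [hmem']; left; rfl
          · intro y hy; rw [hmem'] at hy
            rcases hy with rfl | hy'
            · exact le_rfl
            · simp at hy'
        · simp only [pvBStep]
          rcases le_or_gt s mx with h' | h'
          · refine Or.inr ⟨mx, by simp [not_lt_of_ge h'], ?_, ?_⟩
            · rw [hmem']; right; exact hmem
            · intro y hy; rw [hmem'] at hy
              rcases hy with rfl | hy'
              · exact h'
              · exact hub y hy'
          · refine Or.inr ⟨s, by simp [h'], ?_, ?_⟩
            · rw [hmem']; left; rfl
            · intro y hy; rw [hmem'] at hy
              rcases hy with rfl | hy'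
              · exact le_rfl
              · exact le_of_lt (lt_of_le_of_lt (hub y hy') h')
      simp only [pvALoop, List.foldl_cons]
      rw [ih _ _ _ hs' hinv']
      have hsort : PySem.List.sorted
          (PySem.List.insert acc ((PySem.List.bisectRight acc s : Nat) : Int) s ++ rest) (fun x => x) =
          PySem.List.sorted (acc ++ s :: rest) (fun x => x) :=
        PySem.List.sorted_eq_sorted_of_perm _ _ _ (fun a b h => h)
          ((hperm.append_right rest).trans List.perm_middle.symm)
      rw [hsort, ← hstep]

-- ===== VERDICT (by name: the statement is the Claim_ definition above) =====
theorem sort_subtitles_py_spec : Claim_equal_sort_subtitles_py := by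
  intro subtitles _
  unfold Spec_sort_subtitles_py sort_subtitles_py sort_subtitles_py_alt
  rw [pv_loop_eq subtitles [] 0 none List.Pairwise.nil (Or.inl ⟨rfl, rfl⟩)]
  simp
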